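-- pv_equiv track=rewrite | github.com/SeuPut0705/signal-atlas | signal_atlas/content.py | _title_keywords
-- ===== SOURCE A (Python) =====
-- def _title_keywords(title: str, max_items: int = 6) -> list[str]:
--     words = [w.strip(" ,.!?:;()[]{}\"'") for w in title.split()]
--     words = [w for w in words if len(w) >= 4]
--     if not words:
--         return ["trend", "market", "signal", "timing"]
--     uniq: list[str] = []
--     for word in words:
--         lw = word.lower()
--         if lw not in [u.lower() for u in uniq]:
--             uniq.append(word)
--         if len(uniq) >= max_items:
--             break
--     while len(uniq) < 4:
--         uniq.append(["trend", "market", "signal", "timing"][len(uniq)])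
--     return uniq
-- ===== SOURCE B (Python) =====
-- def _title_keywords(title: str, max_items: int = 6) -> list[str]:
--     words = [w.strip(" ,.!?:;()[]{}\"'") for w in title.split()]
--     words = [w for w in words if len(w) >= 4]
--     if not words:
--         return ["trend", "market", "signal", "timing"]
--     # index of the first occurrence of each lowercase key, in one dict pass
--     first_at: dict[str, int] = {}
--     for i, w in enumerate(words):
--         first_at.setdefault(w.lower(), i)
--     # collect the original-cased words at the smallest first-occurrence indices,
--     # up to the cap
--     uniq: list[str] = []
--     for i in sorted(first_at.values()):
--         if len(uniq) >= max_items: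
--             break
--         uniq.append(words[i])
--     defaults = ["trend", "market", "signal", "timing"]
--     return uniq + defaults[len(uniq):]
-- ===== Notes on version B (the rewrite author's own statement) =====
-- stated objective: alternative
-- what changed: B deduplicates in one dict pass mapping each lowercase key to its first index, then collects the original-cased words at the sorted first-occurrence indices up to the cap (check-before-append) and pads by slicing the defaults list, instead of A's accumulator re-lowercased for every membership test with a break after appending and a while-loop padding.
-- intended difference: When max_items <= 0 and the title yields at least one keyword, A still returns its first keyword plus padding (its cap check runs only after an append), while B returns the four defaults, the intended result of a nonpositive cap. — e.g. on _title_keywords("good", 0): A returns ["good", "market", "signal", "timing"], B returns ["trend", "market", "signal", "timing"]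
import Mathlib
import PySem

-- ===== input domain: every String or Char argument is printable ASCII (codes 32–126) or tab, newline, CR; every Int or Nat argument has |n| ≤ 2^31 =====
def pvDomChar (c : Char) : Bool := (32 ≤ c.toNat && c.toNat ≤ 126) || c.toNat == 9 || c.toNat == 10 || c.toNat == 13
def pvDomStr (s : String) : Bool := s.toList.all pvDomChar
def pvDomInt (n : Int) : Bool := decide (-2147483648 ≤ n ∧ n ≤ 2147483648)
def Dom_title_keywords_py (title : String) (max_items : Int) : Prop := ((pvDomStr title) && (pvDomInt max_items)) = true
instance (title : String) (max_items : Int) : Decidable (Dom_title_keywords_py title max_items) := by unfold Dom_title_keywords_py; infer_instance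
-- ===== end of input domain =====

-- B deduplicates via a dict of first-occurrence indices, then collects the words at the
-- sorted indices up to the cap and pads by slicing the defaults; on a nonpositive cap B
-- intentionally returns only the defaults where A keeps one keyword (see D_ below).

-- ===== PORT A =====
-- both Pythons share their first two lines:
-- words = [w.strip(" ,.!?:;()[]{}\"'") for w in title.split()]; words = [w for w in words if len(w) >= 4]
def pvWordsOf (title : String) : List String :=
  ((PySem.Str.split₀ title).map (fun w => PySem.Str.stripChars w " ,.!?:;()[]{}\"'")).filter
    (fun w => 4 ≤ PySem.Str.len w)

-- A's 'while len(uniq) < 4: uniq.append([...][len(uniq)])'; each iteration adds one word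
-- and the loop stops at length 4, so 4 steps of fuel make the same loop structurally total
def pvPadAux : Nat -> List String -> List String
  | 0, uniq => uniq
  | Nat.succ n, uniq =>
    if uniq.length < 4 then
      pvPadAux n (uniq ++ [(["trend", "market", "signal", "timing"] : List String).getD uniq.length ""])
    else uniq

def pvPad (uniq : List String) : List String := pvPadAux 4 uniq

-- A's for-loop: membership test against the re-lowercased accumulator, break once the cap is reached
def pvALoop (ws : List String) (uniq : List String) (max_items : Int) : List String :=
  match ws with
  | [] => uniq
  | w :: rest =>
    let lw := PySem.Str.lower w
    let uniq' := if (uniq.map (fun u => PySem.Str.lower u)).contains lw then uniq else uniq ++ [w]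
    if max_items ≤ (uniq'.length : Int) then uniq' else pvALoop rest uniq' max_items

def title_keywords_py (title : String) (max_items : Int) : List String :=
  let words := pvWordsOf title
  if words = [] then ["trend", "market", "signal", "timing"]
  else pvPad (pvALoop words [] max_items)

-- ===== PORT B =====
-- B's collection loop: 'for i in sorted(first_at.values()): if len(uniq) >= max_items: break; uniq.append(words[i])'
-- (the index i is always in range, so words[i] is pyGetD)
def pvBLoop (words : List String) (max_items : Int) (ks : List Int) (uniq : List String) : List String :=
  match ks with
  | [] => uniq
  | i :: rest =>
    if max_items ≤ (uniq.length : Int) then uniq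
    else pvBLoop words max_items rest (uniq ++ [PySem.List.pyGetD words i ""])

def title_keywords_py_alt (title : String) (max_items : Int) : List String :=
  let words := pvWordsOf title
  if words = [] then ["trend", "market", "signal", "timing"]
  else
    let first_at := (PySem.List.enumerate words 0).foldl
      (fun d p => d.setdefault (PySem.Str.lower p.2) p.1)
      (PySem.Dict.empty : PySem.Dict String Int)
    let uniq := pvBLoop words max_items
      (PySem.List.sorted (PySem.Dict.values first_at) (fun i => i) false) []
    uniq ++ PySem.List.slice (["trend", "market", "signal", "timing"] : List String)
      (some (uniq.length : Int)) none

-- ===== PRECONDITION & SPEC =====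
-- On titles with at least one kept keyword and max_items ≤ 0, A returns its first keyword
-- plus padding (the cap is only checked after an append), B returns the four defaults,
-- the intended result of a nonpositive cap.
def D_title_keywords_py (title : String) (max_items : Int) : Prop :=
  pvWordsOf title ≠ [] ∧ max_items ≤ 0
instance (title : String) (max_items : Int) : Decidable (D_title_keywords_py title max_items) := by unfold D_title_keywords_py; infer_instance

def Spec_title_keywords_py (title : String) (max_items : Int) (out : List String) : Prop :=
  ¬ D_title_keywords_py title max_items → out = title_keywords_py_alt title max_items
instance (title : String) (max_items : Int) (out : List String) : Decidable (Spec_title_keywords_py title max_items out) := by unfold Spec_title_keywords_py; infer_instance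

def pvDiffWitness_title_keywords_py : String × Int := ("good", 0)
def pvDiffWitnessOut_title_keywords_py : (List String) × (List String) :=
  (["good", "market", "signal", "timing"], ["trend", "market", "signal", "timing"])

-- ===== CLAIM (what is proved, stated in full; the proofs are below) =====
def Claim_unchanged_title_keywords_py : Prop := ∀ (title : String) (max_items : Int), Dom_title_keywords_py title max_items → Spec_title_keywords_py title max_items (title_keywords_py title max_items)
def Claim_changed_title_keywords_py : Prop := Dom_title_keywords_py (pvDiffWitness_title_keywords_py.1) (pvDiffWitness_title_keywords_py.2) ∧ D_title_keywords_py (pvDiffWitness_title_keywords_py.1) (pvDiffWitness_title_keywords_py.2) ∧ title_keywords_py (pvDiffWitness_title_keywords_py.1) (pvDiffWitness_title_keywords_py.2) = pvDiffWitnessOut_title_keywords_py.1 ∧ title_keywords_py_alt (pvDiffWitness_title_keywords_py.1) (pvDiffWitness_title_keywords_py.2) = pvDiffWitnessOut_title_keywords_py.2 ∧ pvDiffWitnessOut_title_keywords_py.1 ≠ pvDiffWitnessOut_title_keywords_py.2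

-- ===== LEMMAS AND PROOFS =====

-- reference dedup of the words themselves
def pvDD (seenKeys : List String) (ws : List String) : List String :=
  match ws with
  | [] => []
  | w :: rest =>
    if seenKeys.contains (PySem.Str.lower w) then pvDD seenKeys rest
    else w :: pvDD (PySem.Str.lower w :: seenKeys) rest

-- reference dedup of (index, word) pairs
def pvDDI (seenKeys : List String) (ps : List (Int × String)) : List (Int × String) :=
  match ps with
  | [] => []
  | (i, w) :: rest =>
    if seenKeys.contains (PySem.Str.lower w) then pvDDI seenKeys rest
    else (i, w) :: pvDDI (PySem.Str.lower w :: seenKeys) rest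

theorem pvDD_congr (k1 k2 ws : List String) (h : ∀ x, k1.contains x = k2.contains x) :
    pvDD k1 ws = pvDD k2 ws := by
  induction ws generalizing k1 k2 with
  | nil => rfl
  | cons w rest ih =>
    simp only [pvDD, h]
    split
    · exact ih _ _ h
    · rw [ih (PySem.Str.lower w :: k1) (PySem.Str.lower w :: k2) (by intro x; simp only [List.contains_cons, h])]

theorem pvDDI_congr (k1 k2 : List String) (ps : List (Int × String)) (h : ∀ x, k1.contains x = k2.contains x) :
    pvDDI k1 ps = pvDDI k2 ps := by
  induction ps generalizing k1 k2 with
  | nil => rfl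
  | cons p rest ih =>
    obtain ⟨i, w⟩ := p
    simp only [pvDDI, h]
    split
    · exact ih _ _ h
    · rw [ih (PySem.Str.lower w :: k1) (PySem.Str.lower w :: k2) (by intro x; simp only [List.contains_cons, h])]

theorem pvALoop_eq (ws : List String) (m : Int) : ∀ (uniq : List String),
    (uniq.length : Int) < m →
    pvALoop ws uniq m = List.take m.toNat (uniq ++ pvDD (uniq.map (fun u => PySem.Str.lower u)) ws) := by
  induction ws with
  | nil =>
    intro uniq h
    simp only [pvALoop, pvDD, List.append_nil]
    exact (List.take_of_length_le (by omega)).symm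
  | cons w rest ih =>
    intro uniq h
    cases hc : (uniq.map (fun u => PySem.Str.lower u)).contains (PySem.Str.lower w) with
    | true =>
      have hdd : pvDD (uniq.map (fun u => PySem.Str.lower u)) (w :: rest)
          = pvDD (uniq.map (fun u => PySem.Str.lower u)) rest := by
        simp only [pvDD, hc, reduceIte]
      simp only [pvALoop, hc, reduceIte]
      rw [if_neg (by omega), ih uniq h, hdd]
    | false =>
      have hdd : pvDD (uniq.map (fun u => PySem.Str.lower u)) (w :: rest)
          = w :: pvDD (PySem.Str.lower w :: uniq.map (fun u => PySem.Str.lower u)) rest := by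
        simp only [pvDD, hc, Bool.false_eq_true, reduceIte]
      simp only [pvALoop, hc, Bool.false_eq_true, reduceIte]
      by_cases hm : m ≤ (((uniq ++ [w]).length : Nat) : Int)
      · rw [if_pos hm]
        have hlen : m.toNat = uniq.length + 1 := by
          simp only [List.length_append, List.length_cons, List.length_nil] at hm
          omega
        rw [hdd, hlen, List.take_append]
        simp
      · rw [if_neg hm]
        rw [ih (uniq ++ [w]) (by simp only [List.length_append, List.length_cons, List.length_nil] at hm ⊢; push_cast at hm ⊢; omega)]
        rw [hdd]
        have hcong : pvDD ((uniq ++ [w]).map (fun u => PySem.Str.lower u)) rest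
            = pvDD (PySem.Str.lower w :: uniq.map (fun u => PySem.Str.lower u)) rest := by
          apply pvDD_congr
          intro x
          simp only [List.map_append, List.map_cons, List.map_nil, List.contains_append,
            List.contains_cons, List.contains_nil, Bool.or_false]
          rw [Bool.or_comm]
        rw [hcong]
        simp

-- the dict fold records precisely the first-occurrence pairs
theorem pvItems_fold (ps : List (Int × String)) (d : PySem.Dict String Int) :
    (ps.foldl (fun d p => d.setdefault (PySem.Str.lower p.2) p.1) d).items
      = d.items ++ (pvDDI d.keys ps).map (fun p => (PySem.Str.lower p.2, p.1)) := by
  induction ps generalizing d with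
  | nil => simp [pvDDI]
  | cons p rest ih =>
    obtain ⟨i, w⟩ := p
    simp only [List.foldl_cons]
    cases hc : d.contains (PySem.Str.lower w) with
    | true =>
      rw [PySem.Dict.setdefault_of_contains _ _ hc, ih]
      have hk : d.keys.contains (PySem.Str.lower w) = true := by
        have hmem : PySem.Str.lower w ∈ d.keys := (PySem.Dict.contains_iff_mem_keys d _).mp hc
        simpa using hmem
      simp only [pvDDI, hk, reduceIte]
    | false =>
      rw [PySem.Dict.setdefault_of_not_contains _ _ hc, ih,
          PySem.Dict.items_insert_of_not_contains _ _ hc,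
          PySem.Dict.keys_insert_of_not_contains _ _ hc]
      have hk : d.keys.contains (PySem.Str.lower w) = false := by
        apply Bool.eq_false_iff.mpr
        intro ht
        have hmem : PySem.Str.lower w ∈ d.keys := by simpa [List.contains_eq_any_beq] using ht
        rw [← PySem.Dict.contains_iff_mem_keys, hc] at hmem
        exact Bool.false_ne_true hmem
      have hcong : pvDDI (d.keys ++ [PySem.Str.lower w]) rest
          = pvDDI (PySem.Str.lower w :: d.keys) rest := by
        apply pvDDI_congr
        intro x
        simp only [List.contains_append, List.contains_cons, List.contains_nil, Bool.or_false]
        rw [Bool.or_comm]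
      rw [hcong]
      simp only [pvDDI, hk, Bool.false_eq_true, reduceIte, List.map_cons, List.append_assoc,
        List.singleton_append]

theorem pvValues_fold (words : List String) :
    PySem.Dict.values ((PySem.List.enumerate words 0).foldl
        (fun d p => d.setdefault (PySem.Str.lower p.2) p.1)
        (PySem.Dict.empty : PySem.Dict String Int))
      = (pvDDI [] (PySem.List.enumerate words 0)).map (fun p => p.1) := by
  have h := pvItems_fold (PySem.List.enumerate words 0) (PySem.Dict.empty : PySem.Dict String Int)
  have hkeys : (PySem.Dict.empty : PySem.Dict String Int).keys = [] := by
    simp [PySem.Dict.keys, PySem.Dict.empty]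
  rw [hkeys] at h
  simp only [PySem.Dict.values, h]
  simp [PySem.Dict.empty, Function.comp_def]

theorem pvDDI_sublist (seen : List String) (ps : List (Int × String)) :
    (pvDDI seen ps).Sublist ps := by
  induction ps generalizing seen with
  | nil => simp [pvDDI]
  | cons p rest ih =>
    obtain ⟨i, w⟩ := p
    simp only [pvDDI]
    split
    · exact (ih seen).cons _
    · exact (ih _).cons₂ _

theorem pvDDI_fst_pairwise (words : List String) :
    ((pvDDI [] (PySem.List.enumerate words 0)).map (fun p => p.1)).Pairwise (· < ·) := by
  have h1 : (PySem.List.enumerate words 0).Pairwise (fun p q => p.1 < q.1) :=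
    PySem.List.pairwise_lt_enumerate words 0
  have h2 := h1.sublist (pvDDI_sublist [] (PySem.List.enumerate words 0))
  exact List.pairwise_map.mpr h2

-- the deduped pairs really pair each index with the word at that index
theorem pvDDI_lookup (words : List String) (p : Int × String)
    (hp : p ∈ pvDDI [] (PySem.List.enumerate words 0)) :
    PySem.List.pyGetD words p.1 "" = p.2 := by
  have hmem : p ∈ PySem.List.enumerate words 0 :=
    (pvDDI_sublist [] (PySem.List.enumerate words 0)).mem hp
  rw [PySem.List.mem_enumerate_iff] at hmem
  obtain ⟨k, hk, rfl⟩ := hmem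
  simp only [Int.zero_add]
  rw [PySem.List.pyGetD_natCast]
  simp [hk]

-- pvDDI projects to pvDD on the words
theorem pvDDI_snd (seen : List String) (ws : List String) : ∀ (s : Int),
    (pvDDI seen (PySem.List.enumerate ws s)).map (fun p => p.2) = pvDD seen ws := by
  induction ws generalizing seen with
  | nil => intro s; simp [pvDDI, pvDD, PySem.List.enumerate_nil]
  | cons w rest ih =>
    intro s
    rw [PySem.List.enumerate_cons]
    simp only [pvDDI, pvDD]
    split
    · exact ih seen (s + 1)
    · simp only [List.map_cons, ih _ (s + 1)]

-- B's collection loop is a take of the mapped indices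
theorem pvBLoop_eq (words : List String) (m : Int) (ks : List Int) : ∀ (uniq : List String),
    pvBLoop words m ks uniq
      = uniq ++ (ks.map (fun i => PySem.List.pyGetD words i "")).take (m - uniq.length).toNat := by
  induction ks with
  | nil => intro uniq; simp [pvBLoop]
  | cons i rest ih =>
    intro uniq
    simp only [pvBLoop]
    by_cases hm : m ≤ (uniq.length : Int)
    · rw [if_pos hm]
      have : (m - uniq.length).toNat = 0 := by omega
      simp [this]
    · rw [if_neg hm, ih]
      have h1 : (m - uniq.length).toNat = (m - ((uniq ++ [PySem.List.pyGetD words i ""]).length : Int)).toNat + 1 := by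
        simp only [List.length_append, List.length_cons, List.length_nil]
        push_cast
        omega
      simp only [List.map_cons, h1, List.take_succ_cons, List.append_assoc, List.singleton_append]

-- padding: A's while loop equals appending the tail of the defaults list
theorem pvPad_eq (uniq : List String) :
    pvPad uniq = uniq ++ (["trend", "market", "signal", "timing"] : List String).drop uniq.length := by
  obtain _ | ⟨a, _ | ⟨b, _ | ⟨c, _ | ⟨d, t⟩⟩⟩⟩ := uniq
  · rfl
  · simp [pvPad, pvPadAux]
  · simp [pvPad, pvPadAux]
  · simp [pvPad, pvPadAux]
  · rw [pvPad, pvPadAux, if_neg (by simp)]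
    rw [List.drop_of_length_le (by simp)]
    simp

-- the sorted first-occurrence indices are already in increasing order
theorem pvSorted_keep (words : List String) :
    PySem.List.sorted ((pvDDI [] (PySem.List.enumerate words 0)).map (fun p => p.1)) (fun i => i) false
      = (pvDDI [] (PySem.List.enumerate words 0)).map (fun p => p.1) := by
  apply PySem.List.sorted_eq_of_perm_of_pairwise_lt
  · exact List.Perm.refl _
  · exact pvDDI_fst_pairwise words

-- mapping pyGetD over the kept indices recovers the deduped words
theorem pvKeep_map (words : List String) :
    ((pvDDI [] (PySem.List.enumerate words 0)).map (fun p => p.1)).map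
        (fun i => PySem.List.pyGetD words i "")
      = pvDD [] words := by
  rw [List.map_map]
  exact (List.map_congr_left (fun p hp => pvDDI_lookup words p hp)).trans (pvDDI_snd [] words 0)

-- ===== VERDICT (by name: the statement is the Claim_ definition above) =====
theorem title_keywords_py_spec : Claim_unchanged_title_keywords_py := by
  intro title m _
  unfold Spec_title_keywords_py title_keywords_py title_keywords_py_alt
  intro hD
  simp only
  split
  · rfl
  · rename_i hne
    have hm : 1 ≤ m := by
      by_contra hc
      exact hD ⟨hne, by omega⟩
    rw [pvValues_fold, pvSorted_keep, pvBLoop_eq, pvKeep_map,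
        pvALoop_eq _ m [] (by simpa using hm)]
    rw [pvPad_eq]
    simp only [List.nil_append, Int.sub_zero, List.length_nil, Nat.cast_zero]
    rw [PySem.List.slice_from _ (by positivity)]
    simp
    omega
theorem title_keywords_py_changed : Claim_changed_title_keywords_py := by
  unfold Claim_changed_title_keywords_py; decide
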